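-- pv_equiv track=rewrite | github.com/akkerman/advent_of_code | 2024/17.py | part_two
-- ===== SOURCE A (Python) =====
-- def part_two(program:list[int], reg_a: int)->int|None:
--     if program == []:
--         return reg_a
--
--     for offset in range(8):
--        a = (reg_a << 3) + offset
--        b = a % 8
--        b = b ^ 1
--        c = a >> b
--        b = b ^ 5
--        b = b ^ c
--        if b % 8 == program[-1]:
--            # a lowest value found, try to solve previous loops
--            prev = part_two(program[:-1], a)
--            if prev: return prev
--
--     return None
-- ===== SOURCE B (Python) =====
-- def part_two(program: list[int], reg_a: int):
--     # Iterative depth-first search with an explicit stack instead of recursion.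
--     if not program:
--         return reg_a
--     stack = [(len(program), reg_a)]  # (digits still to match, accumulated a); front = top
--     while stack:
--         i, a = stack.pop(0)
--         if i == 0:
--             if a:
--                 return a
--             continue
--         target = program[i - 1]
--         children = []
--         for offset in range(8):
--             na = (a << 3) + offset
--             b = (na % 8) ^ 1
--             b = (b ^ 5) ^ (na >> b)
--             if b % 8 == target:
--                 children.append((i - 1, na))
--         stack = children + stack
--     return None
-- ===== Notes on version B (the rewrite author's own statement) =====
-- stated objective: alternative
-- what changed: Replaces A's recursion over program[:-1] (with early return through the call stack) by an iterative depth-first search over an explicit stack of (digits-left, accumulated-a) states, pushing matching children in ascending offset order so the visit order and the `if prev:` truthiness filtering are preserved.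
import Mathlib
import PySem

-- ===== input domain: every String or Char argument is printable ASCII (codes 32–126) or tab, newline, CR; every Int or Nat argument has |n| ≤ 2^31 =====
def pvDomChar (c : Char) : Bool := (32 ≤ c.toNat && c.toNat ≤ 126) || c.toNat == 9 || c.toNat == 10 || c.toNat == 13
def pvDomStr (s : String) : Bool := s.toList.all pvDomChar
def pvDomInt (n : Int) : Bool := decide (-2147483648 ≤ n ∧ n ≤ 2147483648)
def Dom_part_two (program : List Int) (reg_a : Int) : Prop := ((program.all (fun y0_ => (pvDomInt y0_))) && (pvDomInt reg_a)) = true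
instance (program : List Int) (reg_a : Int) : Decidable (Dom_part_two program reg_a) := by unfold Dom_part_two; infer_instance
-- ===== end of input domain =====

-- B replaces A's recursion by an explicit-stack iterative depth-first search in the same visit order; objective: alternative decomposition, not speed.

-- ===== PORT A =====
-- A: recursive search on the last program digit; offsets 0..7 ascending; `if prev:` keeps only truthy (non-None, nonzero) results.
mutual
def part_two (program : List Int) (reg_a : Int) : Option Int :=
  if h : program = [] then some reg_a
  else partTwoLoop program h reg_a [0, 1, 2, 3, 4, 5, 6, 7]
termination_by (program.length, 9)

def partTwoLoop (program : List Int) (h : program ≠ []) (reg_a : Int) : List Int → Option Int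
  | [] => none
  | offset :: rest =>
    let a := (reg_a <<< (3 : Nat)) + offset
    let b1 := PySem.Int.bxor (PySem.Int.mod a 8) 1
    let c := a >>> b1.toNat            -- shift amount b1 = (a % 8) ^ 1 ∈ [0,7], so .toNat is exact
    let b := PySem.Int.bxor (PySem.Int.bxor b1 5) c
    if PySem.List.pyGet? program (-1) = some (PySem.Int.mod b 8) then
      match part_two (PySem.List.slice program none (some (-1))) a with
      | some prev => if prev ≠ 0 then some prev else partTwoLoop program h reg_a rest
      | none => partTwoLoop program h reg_a rest
    else partTwoLoop program h reg_a rest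
termination_by offs => (program.length, offs.length)
decreasing_by
  · rw [PySem.List.slice_to_neg_one]
    refine Prod.Lex.left _ _ ?_
    have hp : program.length ≠ 0 := by simpa [List.length_eq_zero_iff] using h
    simp [List.length_dropLast]; omega
  · exact Prod.Lex.right _ (by simp)
  · exact Prod.Lex.right _ (by simp)
end

-- ===== PORT B =====
-- Source B's per-offset child test: same hardcoded arithmetic; on a digit match push (i-1, extended a)
def altChild (program : List Int) (i : Nat) (a : Int) (offset : Int) : Option (Nat × Int) :=
  let na := (a <<< (3 : Nat)) + offset
  let b1 := PySem.Int.bxor (PySem.Int.mod na 8) 1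
  let b := PySem.Int.bxor (PySem.Int.bxor b1 5) (na >>> b1.toNat)
  if program[i - 1]? = some (PySem.Int.mod b 8) then some (i - 1, na) else none

-- termination measure for the explicit stack: a state with i digits left costs 9^i
def altMeasure (stack : List (Nat × Int)) : Nat := (stack.map (fun p => 9 ^ p.1)).sum

theorem altChild_fst {program : List Int} {i : Nat} {a : Int} {p : Nat × Int}
    (hp : p ∈ List.filterMap (altChild program i a) [0, 1, 2, 3, 4, 5, 6, 7]) :
    p.1 = i - 1 := by
  rw [List.mem_filterMap] at hp
  obtain ⟨o, _, ho⟩ := hp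
  dsimp only [altChild] at ho
  split at ho
  · cases ho; rfl
  · cases ho

theorem altMeasure_children {program : List Int} {i : Nat} {a : Int} (hi : ¬ i = 0) (stack : List (Nat × Int)) :
    altMeasure (List.filterMap (altChild program i a) [0, 1, 2, 3, 4, 5, 6, 7] ++ stack)
      < altMeasure ((i, a) :: stack) := by
  have hlen : (List.filterMap (altChild program i a) [0, 1, 2, 3, 4, 5, 6, 7]).length ≤ 8 := by
    have := List.length_filterMap_le (altChild program i a) [0, 1, 2, 3, 4, 5, 6, 7]
    simpa using this
  have hsum : altMeasure (List.filterMap (altChild program i a) [0, 1, 2, 3, 4, 5, 6, 7])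
      ≤ 8 * 9 ^ (i - 1) := by
    unfold altMeasure
    calc ((List.filterMap (altChild program i a) [0, 1, 2, 3, 4, 5, 6, 7]).map (fun p => 9 ^ p.1)).sum
        ≤ ((List.filterMap (altChild program i a) [0, 1, 2, 3, 4, 5, 6, 7]).map (fun _ => 9 ^ (i - 1))).sum := by
          apply List.sum_le_sum
          intro p hp
          rw [altChild_fst hp]
      _ = (List.filterMap (altChild program i a) [0, 1, 2, 3, 4, 5, 6, 7]).length * 9 ^ (i - 1) := by
          rw [List.map_const', List.sum_replicate, smul_eq_mul]
      _ ≤ 8 * 9 ^ (i - 1) := Nat.mul_le_mul_right _ hlen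
  have h9 : 9 ^ i = 9 * 9 ^ (i - 1) := by
    conv_lhs => rw [show i = (i - 1) + 1 by omega]
    ring
  have hc : 1 ≤ 9 ^ (i - 1) := Nat.one_le_pow _ _ (by omega)
  unfold altMeasure at *
  simp only [List.map_append, List.sum_append, List.map_cons, List.sum_cons]
  omega

-- Source B's while-loop: pop the top state; a finished state returns its a if truthy; else push matching children
def partTwoAltLoop (program : List Int) : List (Nat × Int) → Option Int
  | [] => none
  | (i, a) :: stack =>
    if hi : i = 0 then
      if a ≠ 0 then some a else partTwoAltLoop program stack
    else
      partTwoAltLoop program (List.filterMap (altChild program i a) [0, 1, 2, 3, 4, 5, 6, 7] ++ stack)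
termination_by stack => altMeasure stack
decreasing_by
  · unfold altMeasure; simp
  · exact altMeasure_children hi stack

def part_two_alt (program : List Int) (reg_a : Int) : Option Int :=
  if program = [] then some reg_a
  else partTwoAltLoop program [(program.length, reg_a)]

-- ===== PRECONDITION & SPEC =====
def Spec_part_two (program : List Int) (reg_a : Int) (out : Option Int) : Prop := out = part_two_alt program reg_a
instance (program : List Int) (reg_a : Int) (out : Option Int) : Decidable (Spec_part_two program reg_a out) := by unfold Spec_part_two; infer_instance

-- ===== CLAIM (what is proved, stated in full; the proofs are below) =====
def Claim_equal_part_two : Prop := ∀ (program : List Int) (reg_a : Int), Dom_part_two program reg_a → Spec_part_two program reg_a (part_two program reg_a)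

-- ===== LEMMAS AND PROOFS =====

theorem part_two_ne (program : List Int) (h : program ≠ []) (reg_a : Int) :
    part_two program reg_a = partTwoLoop program h reg_a [0, 1, 2, 3, 4, 5, 6, 7] := by
  rw [part_two]; simp [h]

theorem altLoop_zero (program : List Int) (a : Int) (s : List (Nat × Int)) :
    partTwoAltLoop program ((0, a) :: s) = if a ≠ 0 then some a else partTwoAltLoop program s := by
  rw [partTwoAltLoop]
  simp

theorem altLoop_succ (program : List Int) (j : Nat) (a : Int) (s : List (Nat × Int)) :
    partTwoAltLoop program ((j + 1, a) :: s) =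
      partTwoAltLoop program (List.filterMap (altChild program (j + 1) a) [0, 1, 2, 3, 4, 5, 6, 7] ++ s) := by
  rw [partTwoAltLoop]; simp

theorem partTwoLoop_ne_some_zero (program : List Int) (h : program ≠ []) (reg_a : Int)
    (offs : List Int) : partTwoLoop program h reg_a offs ≠ some 0 := by
  induction offs with
  | nil => rw [partTwoLoop]; simp
  | cons o rest ih =>
    rw [partTwoLoop]
    split
    · split
      · split
        · next hne => simp; omega
        · exact ih
      · exact ih
    · exact ih

theorem pyGet?_take_last (program : List Int) (j : Nat) (hj : j + 1 ≤ program.length) :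
    PySem.List.pyGet? (program.take (j + 1)) (-1) = program[j]? := by
  have hm : min (j + 1) program.length = j + 1 := Nat.min_eq_left hj
  simp [PySem.List.pyGet?, PySem.List.pyIdx?, List.length_take, hm, List.getElem?_take]

theorem dropLast_take (program : List Int) (j : Nat) (hj : j + 1 ≤ program.length) :
    (program.take (j + 1)).dropLast = program.take j := by
  rcases Nat.lt_or_ge (j + 1) program.length with h | h
  · simpa using List.dropLast_take h
  · rw [List.take_of_length_le (by omega), List.dropLast_eq_take]
    congr 1
    omega

theorem inner_lemma (program : List Int) (j : Nat) (hj : j + 1 ≤ program.length)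
    (hne : program.take (j + 1) ≠ [])
    (IH : ∀ (a : Int) (s : List (Nat × Int)),
      partTwoAltLoop program ((j, a) :: s) =
        match part_two (program.take j) a with
        | some v => if v ≠ 0 then some v else partTwoAltLoop program s
        | none => partTwoAltLoop program s)
    (a : Int) :
    ∀ (offs : List Int) (s : List (Nat × Int)),
      partTwoAltLoop program (List.filterMap (altChild program (j + 1) a) offs ++ s) =
        match partTwoLoop (program.take (j + 1)) hne a offs with
        | some v => some v
        | none => partTwoAltLoop program s := by
  intro offs
  induction offs with
  | nil =>
    intro s
    rw [partTwoLoop]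
    simp
  | cons o rest ihr =>
    intro s
    rw [partTwoLoop]
    rw [pyGet?_take_last program j hj]
    by_cases hcond : program[j]? = some (PySem.Int.mod (PySem.Int.bxor (PySem.Int.bxor (PySem.Int.bxor (PySem.Int.mod ((a <<< (3 : Nat)) + o) 8) 1) 5) (((a <<< (3 : Nat)) + o) >>> (PySem.Int.bxor (PySem.Int.mod ((a <<< (3 : Nat)) + o) 8) 1).toNat)) 8)
    · have hchild : altChild program (j + 1) a o = some (j, (a <<< (3 : Nat)) + o) := by
        unfold altChild
        simp only [Nat.add_sub_cancel]
        rw [if_pos hcond]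
      rw [List.filterMap_cons_some hchild, List.cons_append, IH, if_pos hcond,
          PySem.List.slice_to_neg_one, dropLast_take program j hj]
      rcases hprev : part_two (program.take j) ((a <<< (3 : Nat)) + o) with _ | v
      · simp only []
        exact ihr s
      · by_cases hv : v = 0
        · subst hv
          simp only [ne_eq, not_true_eq_false, if_false]
          exact ihr s
        · simp [hv]
    · have hchild : altChild program (j + 1) a o = none := by
        unfold altChild
        simp only [Nat.add_sub_cancel]
        rw [if_neg hcond]
      rw [List.filterMap_cons_none hchild, if_neg hcond]
      exact ihr s

theorem main_lemma (program : List Int) :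
    ∀ (i : Nat), i ≤ program.length → ∀ (a : Int) (s : List (Nat × Int)),
      partTwoAltLoop program ((i, a) :: s) =
        match part_two (program.take i) a with
        | some v => if v ≠ 0 then some v else partTwoAltLoop program s
        | none => partTwoAltLoop program s := by
  intro i
  induction i with
  | zero =>
    intro _ a s
    rw [altLoop_zero, List.take_zero, part_two]
    simp
  | succ j IH =>
    intro hi a s
    have hj : j + 1 ≤ program.length := hi
    have hple : program ≠ [] := by
      intro hnil
      rw [hnil] at hj
      simp at hj
    have hne : program.take (j + 1) ≠ [] := by
      rw [Ne, List.take_eq_nil_iff]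
      push_neg
      exact ⟨by omega, hple⟩
    rw [altLoop_succ, inner_lemma program j hj hne (fun a s => IH (by omega) a s) a _ s,
        part_two_ne _ hne]
    rcases hL : partTwoLoop (program.take (j + 1)) hne a [0, 1, 2, 3, 4, 5, 6, 7] with _ | v
    · rfl
    · have hv : v ≠ 0 := fun h0 => partTwoLoop_ne_some_zero _ hne a _ (h0 ▸ hL)
      simp [hv]

-- ===== VERDICT (by name: the statement is the Claim_ definition above) =====
theorem part_two_spec : Claim_equal_part_two := by
  intro program reg_a _
  unfold Spec_part_two part_two_alt
  by_cases hp : program = []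
  · subst hp; rw [part_two]; simp
  · rw [if_neg hp]
    rw [main_lemma program program.length (le_refl _) reg_a []]
    rw [List.take_length]
    rcases hA : part_two program reg_a with _ | v
    · rw [partTwoAltLoop]
    · have hv : v ≠ 0 := by
        intro h0
        rw [part_two_ne _ hp] at hA
        exact partTwoLoop_ne_some_zero program hp reg_a _ (h0 ▸ hA)
      simp [hv]
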